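-- pv_equiv track=rewrite | github.com/m13v/social-autoposter | scripts/fazm_theme_flip/cleanup_residuals.py | _find_string_literals
-- ===== SOURCE A (Python) =====
-- def _find_string_literals(text: str):
--     """Walk past JS comment syntax as plain chars: JSX text like `system/*`
--     would otherwise trick the scanner into skipping the rest of the file."""
--     n = len(text)
--     i = 0
--     while i < n:
--         c = text[i]
--         if c == '"' or c == "'":
--             j = _scan_simple_string(text, i, c)
--             yield (i, j)
--             i = j
--         elif c == '`':
--             j = _scan_template(text, i)
--             yield (i, j)
--             i = j
--         else:
--             i += 1
--
-- def _scan_simple_string(text: str, start: int, quote: str) -> int: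
--     n = len(text)
--     i = start + 1
--     while i < n:
--         c = text[i]
--         if c == '\\' and i + 1 < n:
--             i += 2
--         elif c == quote:
--             return i + 1
--         elif c == '\n':
--             return i
--         else:
--             i += 1
--     return n
--
-- def _scan_template(text: str, start: int) -> int:
--     n = len(text)
--     i = start + 1
--     while i < n:
--         c = text[i]
--         if c == '\\' and i + 1 < n:
--             i += 2
--         elif c == '`':
--             return i + 1
--         elif c == '$' and i + 1 < n and text[i+1] == '{':
--             i = _find_template_expr_end(text, i)
--         else:
--             i += 1
--     return n
--
-- def _find_template_expr_end(body: str, start: int) -> int: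
--     assert body[start:start+2] == '${'
--     depth = 1
--     i = start + 2
--     n = len(body)
--     while i < n and depth > 0:
--         c = body[i]
--         if c == '{':
--             depth += 1; i += 1
--         elif c == '}':
--             depth -= 1; i += 1
--         elif c == '"' or c == "'":
--             quote = c
--             i += 1
--             while i < n and body[i] != quote:
--                 if body[i] == '\\' and i + 1 < n: i += 2
--                 else: i += 1
--             i += 1
--         elif c == '`':
--             i += 1
--             while i < n and body[i] != '`':
--                 if body[i] == '\\' and i + 1 < n: i += 2
--                 elif body[i:i+2] == '${':
--                     i = _find_template_expr_end(body, i)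
--                 else:
--                     i += 1
--             i += 1
--         else:
--             i += 1
--     return i
-- ===== SOURCE B (Python) =====
-- def _find_string_literals(text: str):
--     """Single forward character pass (no index jumps): escapes are handled by
--     a skip flag and the template-expression lookahead by a dollar flag, over a stack of
--     parsing contexts; a span is yielded when the stack empties."""
--     stack = []  # ('str', q) | ('tmpl',) | ('itmpl',) | ('expr', depth) | ('istr', q)
--     esc = False
--     dollar = False
--     start = 0
--     for i, c in enumerate(text):
--         if esc:
--             esc = False
--             continue
--         if dollar:
--             dollar = False
--             if c == '{':
--                 stack.append(('expr', 1))
--                 continue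
--         if not stack:
--             if c == '"' or c == "'":
--                 stack.append(('str', c)); start = i
--             elif c == '`':
--                 stack.append(('tmpl',)); start = i
--             continue
--         top = stack[-1]
--         kind = top[0]
--         if kind == 'str':
--             if c == '\\':
--                 esc = True
--             elif c == top[1]:
--                 stack.pop(); yield (start, i + 1)
--             elif c == '\n':
--                 stack.pop(); yield (start, i)
--         elif kind == 'tmpl' or kind == 'itmpl':
--             if c == '\\':
--                 esc = True
--             elif c == '`':
--                 stack.pop()
--                 if not stack:
--                     yield (start, i + 1)
--             elif c == '$':
--                 dollar = True
--         elif kind == 'expr':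
--             if c == '{':
--                 stack[-1] = ('expr', top[1] + 1)
--             elif c == '}':
--                 if top[1] == 1:
--                     stack.pop()
--                 else:
--                     stack[-1] = ('expr', top[1] - 1)
--             elif c == '"' or c == "'":
--                 stack.append(('istr', c))
--             elif c == '`':
--                 stack.append(('itmpl',))
--         else:  # 'istr'
--             if c == top[1]:
--                 stack.pop()
--             elif c == '\\':
--                 esc = True
--     if stack:
--         yield (start, len(text))
-- ===== Notes on version B (the rewrite author's own statement) =====
-- stated objective: alternative
-- what changed: A's four mutually recursive index-jumping scanners are replaced by a single forward character pass (no index jumps): escapes become a skip flag, the template-expression lookahead a dollar flag, and nesting an explicit stack of parsing contexts; a span is yielded when the stack empties.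
import Mathlib
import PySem

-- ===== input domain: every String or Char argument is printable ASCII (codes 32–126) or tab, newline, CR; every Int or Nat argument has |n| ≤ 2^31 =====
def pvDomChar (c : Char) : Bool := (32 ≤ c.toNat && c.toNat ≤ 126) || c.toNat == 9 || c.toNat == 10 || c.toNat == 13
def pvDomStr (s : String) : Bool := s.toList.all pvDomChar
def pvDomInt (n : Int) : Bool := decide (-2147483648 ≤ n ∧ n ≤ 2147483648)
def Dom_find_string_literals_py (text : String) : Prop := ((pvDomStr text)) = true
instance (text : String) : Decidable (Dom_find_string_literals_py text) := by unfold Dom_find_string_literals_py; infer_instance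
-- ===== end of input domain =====

-- B replaces A's four index-jumping mutually recursive scanners by one forward pass over the
-- characters, with an escape flag and a template-expression lookahead flag over a stack of parsing contexts
-- (objective: alternative decomposition, no speed claim).

-- ===== PORT A =====
-- text[i]; used only under i < cs.length, where Python indexing cannot raise
def pvCharAt (cs : List Char) (i : Nat) : Char := cs.getD i default

-- small shared facts cited by the ports' decreasing_by clauses
theorem pvSub1 {n i : Nat} (h : i < n) : n - (i + 1) < n - i := Nat.sub_succ_lt_self n i h
theorem pvSub2 {n i : Nat} (h : i < n) : n - (i + 2) < n - i :=
  lt_of_le_of_lt (Nat.sub_le_sub_left (Nat.le_succ (i + 1)) n) (pvSub1 h)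
theorem pvMaxDec {n i j : Nat} (h : i < n) : n - max j (i + 1) < n - i :=
  lt_of_le_of_lt (Nat.sub_le_sub_left (le_max_right j (i + 1)) n) (pvSub1 h)

-- _scan_simple_string's while loop (from index i)
def scanSimpleLoop (cs : List Char) (q : Char) (i : Nat) : Nat :=
  if h : i < cs.length then
    if pvCharAt cs i = '\\' ∧ i + 1 < cs.length then scanSimpleLoop cs q (i + 2)
    else if pvCharAt cs i = q then i + 1
    else if pvCharAt cs i = '\n' then i
    else scanSimpleLoop cs q (i + 1)
  else cs.length
termination_by cs.length - i
decreasing_by all_goals first | exact pvSub2 h | exact pvSub1 h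

-- the inner simple-string while loop of _find_template_expr_end (from index i)
def innerStrLoop (cs : List Char) (q : Char) (i : Nat) : Nat :=
  if h : i < cs.length ∧ pvCharAt cs i ≠ q then
    if pvCharAt cs i = '\\' ∧ i + 1 < cs.length then innerStrLoop cs q (i + 2)
    else innerStrLoop cs q (i + 1)
  else i
termination_by cs.length - i
decreasing_by all_goals first | exact pvSub2 h.1 | exact pvSub1 h.1

-- the mutually recursive loops of _scan_template / _find_template_expr_end (and the
-- inner nested-template loop); a while/recursion cluster, guarded by fuel
mutual
def scanTplLoop (cs : List Char) : Nat → Nat → Nat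
  | 0, _ => cs.length
  | fuel + 1, i =>
    if i < cs.length then
      if pvCharAt cs i = '\\' ∧ i + 1 < cs.length then scanTplLoop cs fuel (i + 2)
      else if pvCharAt cs i = '`' then i + 1
      else if pvCharAt cs i = '$' ∧ i + 1 < cs.length ∧ pvCharAt cs (i + 1) = '{' then
        scanTplLoop cs fuel (exprLoop cs fuel (i + 2) 1)
      else scanTplLoop cs fuel (i + 1)
    else cs.length

def exprLoop (cs : List Char) : Nat → Nat → Nat → Nat
  | 0, i, _ => i
  | fuel + 1, i, depth =>
    if i < cs.length ∧ 0 < depth then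
      if pvCharAt cs i = '{' then exprLoop cs fuel (i + 1) (depth + 1)
      else if pvCharAt cs i = '}' then exprLoop cs fuel (i + 1) (depth - 1)
      else if pvCharAt cs i = '"' ∨ pvCharAt cs i = '\'' then
        exprLoop cs fuel (innerStrLoop cs (pvCharAt cs i) (i + 1) + 1) depth
      else if pvCharAt cs i = '`' then exprLoop cs fuel (innerTmplLoop cs fuel (i + 1) + 1) depth
      else exprLoop cs fuel (i + 1) depth
    else i

def innerTmplLoop (cs : List Char) : Nat → Nat → Nat
  | 0, i => i
  | fuel + 1, i =>
    if i < cs.length ∧ pvCharAt cs i ≠ '`' then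
      if pvCharAt cs i = '\\' ∧ i + 1 < cs.length then innerTmplLoop cs fuel (i + 2)
      else if PySem.List.slice cs (some (i : Int)) (some ((i : Int) + 2)) = ['$', '{'] then
        innerTmplLoop cs fuel (exprLoop cs fuel (i + 2) 1)
      else innerTmplLoop cs fuel (i + 1)
    else i
end

-- the main generator loop of _find_string_literals, accumulating the yields.
-- 'max … (i + 1)' is only a termination guard: the scanners always return an index > i
-- (scanSimpleLoop_ge / scanTplLoop_ge below), so the guard never changes the value
def findLoop (cs : List Char) (i : Nat) (acc : List (Int × Int)) : List (Int × Int) :=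
  if h : i < cs.length then
    if pvCharAt cs i = '"' ∨ pvCharAt cs i = '\'' then
      findLoop cs (max (scanSimpleLoop cs (pvCharAt cs i) (i + 1)) (i + 1))
        (acc ++ [((i : Int), (scanSimpleLoop cs (pvCharAt cs i) (i + 1) : Int))])
    else if pvCharAt cs i = '`' then
      findLoop cs (max (scanTplLoop cs (cs.length + 1) (i + 1)) (i + 1))
        (acc ++ [((i : Int), (scanTplLoop cs (cs.length + 1) (i + 1) : Int))])
    else findLoop cs (i + 1) acc
  else acc
termination_by cs.length - i
decreasing_by
  · exact pvMaxDec h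
  · exact pvMaxDec h
  · exact pvSub1 h

def find_string_literals_py (text : String) : List (Int × Int) :=
  findLoop text.toList 0 []

-- ===== PORT B =====
-- the parsing contexts of Source B's stack
inductive Ctx : Type
  | str (q : Char)
  | tmpl
  | expr (d : Nat)
  | istr (q : Char)
  | itmpl
deriving DecidableEq, Repr

-- Source B's single forward for-loop over the characters: n is len(text), i the current index,
-- esc the skip-one-escaped-char flag, dollar the "previous char was an unescaped '$' in a
-- template" flag, start the recorded span start, acc the yields so far
def brun (n : Nat) : List Char → Nat → List Ctx → Bool → Bool → Nat → List (Int × Int) → List (Int × Int)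
  | [], _, stack, _, _, start, acc =>
      if stack.isEmpty then acc else acc ++ [((start : Int), (n : Int))]
  | c :: rest, i, stack, esc, dollar, start, acc =>
    if esc then brun n rest (i + 1) stack false dollar start acc
    else if dollar ∧ c = '{' then brun n rest (i + 1) (Ctx.expr 1 :: stack) false false start acc
    else
      match stack with
      | [] =>
        if c = '"' ∨ c = '\'' then brun n rest (i + 1) [Ctx.str c] false false i acc
        else if c = '`' then brun n rest (i + 1) [Ctx.tmpl] false false i acc
        else brun n rest (i + 1) [] false false start acc
      | Ctx.str q :: t =>
        if c = '\\' then brun n rest (i + 1) (Ctx.str q :: t) true false start acc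
        else if c = q then brun n rest (i + 1) t false false start (acc ++ [((start : Int), ((i : Int) + 1))])
        else if c = '\n' then brun n rest (i + 1) t false false start (acc ++ [((start : Int), (i : Int))])
        else brun n rest (i + 1) (Ctx.str q :: t) false false start acc
      | Ctx.tmpl :: t =>
        if c = '\\' then brun n rest (i + 1) (Ctx.tmpl :: t) true false start acc
        else if c = '`' then
          brun n rest (i + 1) t false false start
            (if t.isEmpty then acc ++ [((start : Int), ((i : Int) + 1))] else acc)
        else if c = '$' then brun n rest (i + 1) (Ctx.tmpl :: t) false true start acc
        else brun n rest (i + 1) (Ctx.tmpl :: t) false false start acc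
      | Ctx.itmpl :: t =>
        if c = '\\' then brun n rest (i + 1) (Ctx.itmpl :: t) true false start acc
        else if c = '`' then
          brun n rest (i + 1) t false false start
            (if t.isEmpty then acc ++ [((start : Int), ((i : Int) + 1))] else acc)
        else if c = '$' then brun n rest (i + 1) (Ctx.itmpl :: t) false true start acc
        else brun n rest (i + 1) (Ctx.itmpl :: t) false false start acc
      | Ctx.expr d :: t =>
        if c = '{' then brun n rest (i + 1) (Ctx.expr (d + 1) :: t) false false start acc
        else if c = '}' then
          if d = 1 then brun n rest (i + 1) t false false start acc
          else brun n rest (i + 1) (Ctx.expr (d - 1) :: t) false false start acc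
        else if c = '"' ∨ c = '\'' then brun n rest (i + 1) (Ctx.istr c :: Ctx.expr d :: t) false false start acc
        else if c = '`' then brun n rest (i + 1) (Ctx.itmpl :: Ctx.expr d :: t) false false start acc
        else brun n rest (i + 1) (Ctx.expr d :: t) false false start acc
      | Ctx.istr q :: t =>
        if c = q then brun n rest (i + 1) t false false start acc
        else if c = '\\' then brun n rest (i + 1) (Ctx.istr q :: t) true false start acc
        else brun n rest (i + 1) (Ctx.istr q :: t) false false start acc

def find_string_literals_py_alt (text : String) : List (Int × Int) :=
  brun text.toList.length text.toList 0 [] false false 0 []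

-- ===== PRECONDITION & SPEC =====
def Spec_find_string_literals_py (text : String) (out : List (Int × Int)) : Prop := out = find_string_literals_py_alt text
instance (text : String) (out : List (Int × Int)) : Decidable (Spec_find_string_literals_py text out) := by unfold Spec_find_string_literals_py; infer_instance

-- ===== CLAIM (what is proved, stated in full; the proofs are below) =====
def Claim_equal_find_string_literals_py : Prop := ∀ (text : String), Dom_find_string_literals_py text → Spec_find_string_literals_py text (find_string_literals_py text)

-- ===== LEMMAS AND PROOFS =====

-- the scanners never move backwards (so findLoop's max termination guard never fires)
theorem innerStrLoop_ge (cs : List Char) (q : Char) (i : Nat) : i ≤ innerStrLoop cs q i := by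
  fun_induction innerStrLoop cs q i <;> omega

theorem trio_ge (cs : List Char) (fuel : Nat) :
    (∀ i d, i ≤ exprLoop cs fuel i d) ∧ (∀ i, i ≤ innerTmplLoop cs fuel i) := by
  induction fuel with
  | zero => exact ⟨fun i d => le_of_eq rfl, fun i => le_of_eq rfl⟩
  | succ g ih =>
    constructor
    · intro i d
      simp only [exprLoop]
      split_ifs
      · have := ih.1 (i + 1) (d + 1); omega
      · have := ih.1 (i + 1) (d - 1); omega
      · have h1 := innerStrLoop_ge cs (pvCharAt cs i) (i + 1)
        have h2 := ih.1 (innerStrLoop cs (pvCharAt cs i) (i + 1) + 1) d; omega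
      · have h1 := ih.2 (i + 1)
        have h2 := ih.1 (innerTmplLoop cs g (i + 1) + 1) d; omega
      · have := ih.1 (i + 1) d; omega
      · exact le_refl i
    · intro i
      simp only [innerTmplLoop]
      split_ifs
      · have := ih.2 (i + 2); omega
      · have h1 := ih.1 (i + 2) 1
        have h2 := ih.2 (exprLoop cs g (i + 2) 1); omega
      · have := ih.2 (i + 1); omega
      · exact le_refl i

theorem exprLoop_ge (cs : List Char) (fuel i d : Nat) : i ≤ exprLoop cs fuel i d :=
  (trio_ge cs fuel).1 i d

theorem scanSimpleLoop_ge (cs : List Char) (q : Char) (i : Nat) :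
    i ≤ scanSimpleLoop cs q i ∨ scanSimpleLoop cs q i = cs.length := by
  fun_induction scanSimpleLoop cs q i <;> omega

theorem scanTplLoop_ge (cs : List Char) (fuel i : Nat) :
    i + 1 ≤ scanTplLoop cs fuel i ∨ scanTplLoop cs fuel i = cs.length := by
  induction fuel generalizing i with
  | zero => exact Or.inr rfl
  | succ g ih =>
    simp only [scanTplLoop]
    split_ifs
    · rcases ih (i + 2) with h | h <;> omega
    · exact Or.inl (le_refl (i + 1))
    · have h1 := exprLoop_ge cs g (i + 2) 1
      rcases ih (exprLoop cs g (i + 2) 1) with h | h <;> omega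
    · rcases ih (i + 1) with h | h <;> omega
    · exact Or.inr rfl

theorem innerTmplLoop_ge (cs : List Char) (fuel i : Nat) : i ≤ innerTmplLoop cs fuel i :=
  (trio_ge cs fuel).2 i

-- text[i] as a getElem, under the in-range guard
theorem pvCharAt_eq (cs : List Char) (i : Nat) (h : i < cs.length) :
    pvCharAt cs i = cs[i] := List.getD_eq_getElem cs default h

-- one fuel unit more does not change the template-cluster loops once fuel covers the text
theorem stab_step (cs : List Char) (fuel : Nat) :
    (∀ i, cs.length + 1 ≤ fuel + i → scanTplLoop cs (fuel + 1) i = scanTplLoop cs fuel i) ∧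
    (∀ i d, cs.length + 1 ≤ fuel + i → exprLoop cs (fuel + 1) i d = exprLoop cs fuel i d) ∧
    (∀ i, cs.length + 1 ≤ fuel + i → innerTmplLoop cs (fuel + 1) i = innerTmplLoop cs fuel i) := by
  induction fuel with
  | zero =>
    refine ⟨fun i h => ?_, fun i d h => ?_, fun i h => ?_⟩
    · simp only [scanTplLoop]; rw [if_neg (by omega)]
    · simp only [exprLoop]; rw [if_neg (by omega)]
    · simp only [innerTmplLoop]; rw [if_neg (by rintro ⟨h1, -⟩; omega)]
  | succ g ih =>
    refine ⟨fun i h => ?_, fun i d h => ?_, fun i h => ?_⟩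
    · conv_lhs => rw [scanTplLoop]
      conv_rhs => rw [scanTplLoop]
      split_ifs with h0 h1 h2 h3
      · exact ih.1 (i + 2) (by omega)
      · rfl
      · rw [ih.2.1 (i + 2) 1 (by omega)]
        exact ih.1 _ (by have := exprLoop_ge cs g (i + 2) 1; omega)
      · exact ih.1 (i + 1) (by omega)
      · rfl
    · conv_lhs => rw [exprLoop]
      conv_rhs => rw [exprLoop]
      split_ifs with h0 h1 h2 h3 h4
      · exact ih.2.1 (i + 1) (d + 1) (by omega)
      · exact ih.2.1 (i + 1) (d - 1) (by omega)
      · exact ih.2.1 _ d (by have := innerStrLoop_ge cs (pvCharAt cs i) (i + 1); omega)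
      · rw [ih.2.2 (i + 1) (by omega)]
        exact ih.2.1 _ d (by have := innerTmplLoop_ge cs g (i + 1); omega)
      · exact ih.2.1 (i + 1) d (by omega)
      · rfl
    · conv_lhs => rw [innerTmplLoop]
      conv_rhs => rw [innerTmplLoop]
      split_ifs with h0 h1 h2
      · exact ih.2.2 (i + 2) (by omega)
      · rw [ih.2.1 (i + 2) 1 (by omega)]
        exact ih.2.2 _ (by have := exprLoop_ge cs g (i + 2) 1; omega)
      · exact ih.2.2 (i + 1) (by omega)
      · rfl

-- one-iteration unfolding equations for A's loops, all at the port's fuel cs.length + 1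
theorem scanSimple_step (cs : List Char) (q : Char) (i : Nat) (h : i < cs.length) :
    scanSimpleLoop cs q i =
      if pvCharAt cs i = '\\' ∧ i + 1 < cs.length then scanSimpleLoop cs q (i + 2)
      else if pvCharAt cs i = q then i + 1
      else if pvCharAt cs i = '\n' then i
      else scanSimpleLoop cs q (i + 1) := by
  conv_lhs => rw [scanSimpleLoop]
  rw [dif_pos h]

theorem scanSimple_eof (cs : List Char) (q : Char) (i : Nat) (h : ¬ i < cs.length) :
    scanSimpleLoop cs q i = cs.length := by
  conv_lhs => rw [scanSimpleLoop]
  rw [dif_neg h]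

theorem innerStr_step (cs : List Char) (q : Char) (i : Nat) (h : i < cs.length)
    (hne : pvCharAt cs i ≠ q) :
    innerStrLoop cs q i =
      if pvCharAt cs i = '\\' ∧ i + 1 < cs.length then innerStrLoop cs q (i + 2)
      else innerStrLoop cs q (i + 1) := by
  conv_lhs => rw [innerStrLoop]
  rw [dif_pos ⟨h, hne⟩]

theorem innerStr_stop (cs : List Char) (q : Char) (i : Nat)
    (h : ¬ (i < cs.length ∧ pvCharAt cs i ≠ q)) : innerStrLoop cs q i = i := by
  conv_lhs => rw [innerStrLoop]
  rw [dif_neg h]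

theorem scanTpl_step (cs : List Char) (i : Nat) (h : i < cs.length) :
    scanTplLoop cs (cs.length + 1) i =
      if pvCharAt cs i = '\\' ∧ i + 1 < cs.length then scanTplLoop cs (cs.length + 1) (i + 2)
      else if pvCharAt cs i = '`' then i + 1
      else if pvCharAt cs i = '$' ∧ i + 1 < cs.length ∧ pvCharAt cs (i + 1) = '{' then
        scanTplLoop cs (cs.length + 1) (exprLoop cs (cs.length + 1) (i + 2) 1)
      else scanTplLoop cs (cs.length + 1) (i + 1)
      := by
  have st := stab_step cs cs.length
  conv_lhs => rw [scanTplLoop]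
  rw [if_pos h]
  split_ifs with h1 h2 h3
  · exact (st.1 (i + 2) (by omega)).symm
  · rfl
  · rw [st.2.1 (i + 2) 1 (by omega)]
    exact (st.1 _ (by have := exprLoop_ge cs cs.length (i + 2) 1; omega)).symm
  · exact (st.1 (i + 1) (by omega)).symm

theorem scanTpl_eof (cs : List Char) (i : Nat) (h : ¬ i < cs.length) :
    scanTplLoop cs (cs.length + 1) i = cs.length := by
  conv_lhs => rw [scanTplLoop]
  rw [if_neg h]

theorem expr_step (cs : List Char) (i d : Nat) (h : i < cs.length) (hd : 0 < d) :
    exprLoop cs (cs.length + 1) i d =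
      if pvCharAt cs i = '{' then exprLoop cs (cs.length + 1) (i + 1) (d + 1)
      else if pvCharAt cs i = '}' then exprLoop cs (cs.length + 1) (i + 1) (d - 1)
      else if pvCharAt cs i = '"' ∨ pvCharAt cs i = '\'' then
        exprLoop cs (cs.length + 1) (innerStrLoop cs (pvCharAt cs i) (i + 1) + 1) d
      else if pvCharAt cs i = '`' then
        exprLoop cs (cs.length + 1) (innerTmplLoop cs (cs.length + 1) (i + 1) + 1) d
      else exprLoop cs (cs.length + 1) (i + 1) d := by
  have st := stab_step cs cs.length
  conv_lhs => rw [exprLoop]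
  rw [if_pos ⟨h, hd⟩]
  split_ifs with h1 h2 h3 h4
  · exact (st.2.1 (i + 1) (d + 1) (by omega)).symm
  · exact (st.2.1 (i + 1) (d - 1) (by omega)).symm
  · exact (st.2.1 _ d (by have := innerStrLoop_ge cs (pvCharAt cs i) (i + 1); omega)).symm
  · rw [st.2.2 (i + 1) (by omega)]
    exact (st.2.1 _ d (by have := innerTmplLoop_ge cs cs.length (i + 1); omega)).symm
  · exact (st.2.1 (i + 1) d (by omega)).symm

theorem expr_stop (cs : List Char) (i d : Nat) (h : ¬ (i < cs.length ∧ 0 < d)) :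
    exprLoop cs (cs.length + 1) i d = i := by
  conv_lhs => rw [exprLoop]
  rw [if_neg h]

-- Python's `body[i:i+2] == '${'` as a character test, for i in range
theorem slice_brace (cs : List Char) (i : Nat) (h : i < cs.length) :
    (PySem.List.slice cs (some (i : Int)) (some ((i : Int) + 2)) = ['$', '{']) ↔
      (pvCharAt cs i = '$' ∧ i + 1 < cs.length ∧ pvCharAt cs (i + 1) = '{') := by
  have e2 : ((i : Int) + 2) = (((i + 2 : Nat) : Int)) := by push_cast; ring
  rw [e2, PySem.List.slice_natCast, Nat.add_sub_cancel_left, List.drop_eq_getElem_cons h]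
  rw [pvCharAt_eq cs i h]
  by_cases h1 : i + 1 < cs.length
  · rw [List.drop_eq_getElem_cons h1, pvCharAt_eq cs (i + 1) h1]
    constructor
    · intro he
      injection he with e1 e2; injection e2 with e2 _
      exact ⟨e1, h1, e2⟩
    · rintro ⟨e1, -, e2⟩
      rw [e1, e2]
      rfl
  · rw [List.drop_eq_nil_of_le (le_of_not_gt h1)]
    constructor
    · intro he
      exact absurd (congrArg List.length he) (by simp)
    · rintro ⟨-, hlt, -⟩
      exact absurd hlt h1

theorem innerTmpl_close (cs : List Char) (i : Nat)
    (h : ¬ (i < cs.length ∧ pvCharAt cs i ≠ '`')) :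
    innerTmplLoop cs (cs.length + 1) i = i := by
  conv_lhs => rw [innerTmplLoop]
  rw [if_neg h]

theorem innerTmpl_step (cs : List Char) (i : Nat) (h : i < cs.length)
    (hne : pvCharAt cs i ≠ '`') :
    innerTmplLoop cs (cs.length + 1) i =
      if pvCharAt cs i = '\\' ∧ i + 1 < cs.length then innerTmplLoop cs (cs.length + 1) (i + 2)
      else if pvCharAt cs i = '$' ∧ i + 1 < cs.length ∧ pvCharAt cs (i + 1) = '{' then
        innerTmplLoop cs (cs.length + 1) (exprLoop cs (cs.length + 1) (i + 2) 1)
      else innerTmplLoop cs (cs.length + 1) (i + 1) := by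
  have st := stab_step cs cs.length
  have hiff := slice_brace cs i h
  conv_lhs => rw [innerTmplLoop]
  rw [if_pos ⟨h, hne⟩]
  split_ifs with h1 h2 h3 h4
  · exact (st.2.2 (i + 2) (by omega)).symm
  · rw [st.2.1 (i + 2) 1 (by omega)]
    exact (st.2.2 _ (by have := exprLoop_ge cs cs.length (i + 2) 1; omega)).symm
  · exact absurd (hiff.mp h2) h3
  · exact absurd (hiff.mpr h4) h2
  · exact (st.2.2 (i + 1) (by omega)).symm

theorem findLoop_step (cs : List Char) (i : Nat) (acc : List (Int × Int)) (h : i < cs.length) :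
    findLoop cs i acc =
      if pvCharAt cs i = '"' ∨ pvCharAt cs i = '\'' then
        findLoop cs (scanSimpleLoop cs (pvCharAt cs i) (i + 1))
          (acc ++ [((i : Int), (scanSimpleLoop cs (pvCharAt cs i) (i + 1) : Int))])
      else if pvCharAt cs i = '`' then
        findLoop cs (scanTplLoop cs (cs.length + 1) (i + 1))
          (acc ++ [((i : Int), (scanTplLoop cs (cs.length + 1) (i + 1) : Int))])
      else findLoop cs (i + 1) acc := by
  have hms : max (scanSimpleLoop cs (pvCharAt cs i) (i + 1)) (i + 1) =
      scanSimpleLoop cs (pvCharAt cs i) (i + 1) := by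
    rcases scanSimpleLoop_ge cs (pvCharAt cs i) (i + 1) with h1 | h1 <;> omega
  have hmt : max (scanTplLoop cs (cs.length + 1) (i + 1)) (i + 1) =
      scanTplLoop cs (cs.length + 1) (i + 1) := by
    rcases scanTplLoop_ge cs (cs.length + 1) (i + 1) with h1 | h1 <;> omega
  conv_lhs => rw [findLoop]
  rw [dif_pos h, hms, hmt]

theorem findLoop_eof (cs : List Char) (i : Nat) (acc : List (Int × Int))
    (h : ¬ i < cs.length) : findLoop cs i acc = acc := by
  conv_lhs => rw [findLoop]
  rw [dif_neg h]

-- validity of Source B's reachable stacks: the bottom context is a top-level string or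
-- template literal (with a real quote char), everything above it is an inner context
def bottomOk : Ctx → Prop
  | Ctx.str q => q = '"' ∨ q = '\''
  | Ctx.tmpl => True
  | _ => False

def isInner : Ctx → Prop
  | Ctx.expr d => 1 ≤ d
  | Ctx.istr _ => True
  | Ctx.itmpl => True
  | _ => False

def Valid : List Ctx → Prop
  | [] => True
  | [c] => bottomOk c
  | c :: c' :: rest => isInner c ∧ Valid (c' :: rest)

-- the dollar flag can only be raised over a template context
def DollarOk (dollar : Bool) (s : List Ctx) : Prop :=
  dollar = true → s.head? = some Ctx.tmpl ∨ s.head? = some Ctx.itmpl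

-- what remains of A's computation when B sits at position i over this context stack
def Aresume (cs : List Char) : List Ctx → Nat → Nat → List (Int × Int) → List (Int × Int)
  | [], i, _start, acc => findLoop cs i acc
  | Ctx.str q :: _, i, start, acc =>
      findLoop cs (scanSimpleLoop cs q i)
        (acc ++ [((start : Int), (scanSimpleLoop cs q i : Int))])
  | Ctx.tmpl :: _, i, start, acc =>
      findLoop cs (scanTplLoop cs (cs.length + 1) i)
        (acc ++ [((start : Int), (scanTplLoop cs (cs.length + 1) i : Int))])
  | Ctx.expr d :: rest, i, start, acc =>
      Aresume cs rest (exprLoop cs (cs.length + 1) i d) start acc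
  | Ctx.istr q :: rest, i, start, acc =>
      Aresume cs rest (innerStrLoop cs q i + 1) start acc
  | Ctx.itmpl :: rest, i, start, acc =>
      Aresume cs rest (innerTmplLoop cs (cs.length + 1) i + 1) start acc

-- what remains of A's computation given B's pending flags: an escaped char is already
-- consumed by A, a pending '$' resolves on the next char
def AresumeF (cs : List Char) (s : List Ctx) (esc dollar : Bool) (i start : Nat)
    (acc : List (Int × Int)) : List (Int × Int) :=
  if esc then Aresume cs s (i + 1) start acc
  else if dollar ∧ i < cs.length ∧ pvCharAt cs i = '{' then
    Aresume cs (Ctx.expr 1 :: s) (i + 1) start acc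
  else Aresume cs s i start acc

theorem Aresume_eof (cs : List Char) (s : List Ctx) :
    ∀ (i start : Nat) (acc : List (Int × Int)), cs.length ≤ i → Valid s →
      Aresume cs s i start acc =
        if s.isEmpty then acc else acc ++ [((start : Int), (cs.length : Int))] := by
  induction s with
  | nil =>
    intro i start acc hi _
    simp only [Aresume, List.isEmpty_nil, if_true]
    exact findLoop_eof cs i acc (by omega)
  | cons c rest ih =>
    intro i start acc hi hv
    cases c with
    | str q =>
      simp only [Aresume, List.isEmpty_cons]
      rw [scanSimple_eof cs q i (by omega), findLoop_eof cs _ _ (by omega)]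
      rfl
    | tmpl =>
      simp only [Aresume, List.isEmpty_cons]
      rw [scanTpl_eof cs i (by omega), findLoop_eof cs _ _ (by omega)]
      rfl
    | expr d =>
      cases rest with
      | nil => exact hv.elim
      | cons c' t =>
        simp only [Aresume]
        rw [expr_stop cs i d (by rintro ⟨a, -⟩; omega)]
        rw [ih i start acc hi hv.2]
        rfl
    | istr q =>
      cases rest with
      | nil => exact hv.elim
      | cons c' t =>
        simp only [Aresume]
        rw [innerStr_stop cs q i (by rintro ⟨a, -⟩; omega)]
        rw [ih (i + 1) start acc (by omega) hv.2]
        rfl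
    | itmpl =>
      cases rest with
      | nil => exact hv.elim
      | cons c' t =>
        simp only [Aresume]
        rw [innerTmpl_close cs i (by rintro ⟨a, -⟩; omega)]
        rw [ih (i + 1) start acc (by omega) hv.2]
        rfl

-- the simulation: B's forward pass from any reachable state computes what remains of A
theorem brun_eq_AresumeF (cs : List Char) : ∀ (rest : List Char) (i start : Nat)
    (stack : List Ctx) (esc dollar : Bool) (acc : List (Int × Int)),
    cs.drop i = rest → Valid stack → DollarOk dollar stack → (esc = true → dollar = false) →
    brun cs.length rest i stack esc dollar start acc = AresumeF cs stack esc dollar i start acc := by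
  intro rest
  induction rest with
  | nil =>
    intro i start stack esc dollar acc hdr hv _ _
    have hlen : cs.length ≤ i := List.drop_eq_nil_iff.mp hdr
    have e1 := Aresume_eof cs stack i start acc hlen hv
    have e2 := Aresume_eof cs stack (i + 1) start acc (by omega) hv
    have hnd : ¬ (dollar = true ∧ i < cs.length ∧ pvCharAt cs i = '{') := by
      rintro ⟨-, hlt, -⟩; omega
    simp only [brun]
    unfold AresumeF
    cases esc
    · rw [if_neg Bool.false_ne_true, if_neg hnd, e1]
    · rw [if_pos (rfl : (true : Bool) = true), e2]
  | cons c rest ih =>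
    intro i start stack esc dollar acc hdr hv hdol hed
    have hi : i < cs.length := by
      by_contra h
      rw [List.drop_eq_nil_of_le (by omega)] at hdr
      exact absurd hdr (by simp)
    have hsplit : cs.drop i = cs[i] :: cs.drop (i + 1) := List.drop_eq_getElem_cons hi
    rw [hdr] at hsplit
    have hc : pvCharAt cs i = c := by rw [pvCharAt_eq cs i hi]; exact (List.cons.inj hsplit).1.symm
    have hrest : cs.drop (i + 1) = rest := ((List.cons.inj hsplit).2).symm
    subst hc
    -- the IH, specialised to the three flag states B's transitions produce
    have ihN : ∀ (st : List Ctx) (s : Nat) (a : List (Int × Int)), Valid st →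
        brun cs.length rest (i + 1) st false false s a = Aresume cs st (i + 1) s a := by
      intro st s a hv'
      rw [ih (i + 1) s st false false a hrest hv' (by simp [DollarOk]) (by simp)]
      simp [AresumeF]
    have ihE : ∀ (st : List Ctx) (s : Nat) (a : List (Int × Int)), Valid st →
        brun cs.length rest (i + 1) st true false s a = Aresume cs st (i + 2) s a := by
      intro st s a hv'
      rw [ih (i + 1) s st true false a hrest hv' (by simp [DollarOk]) (by simp)]
      simp [AresumeF]
    have ihD : ∀ (st : List Ctx) (s : Nat) (a : List (Int × Int)), Valid st → DollarOk true st →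
        brun cs.length rest (i + 1) st false true s a =
          if i + 1 < cs.length ∧ pvCharAt cs (i + 1) = '{' then
            Aresume cs (Ctx.expr 1 :: st) (i + 2) s a
          else Aresume cs st (i + 1) s a := by
      intro st s a hv' hdk
      rw [ih (i + 1) s st false true a hrest hv' hdk (by simp)]
      simp only [AresumeF, Bool.false_eq_true, if_false]
      by_cases h5 : i + 1 < cs.length ∧ pvCharAt cs (i + 1) = '{'
      · rw [if_pos ⟨trivial, h5.1, h5.2⟩, if_pos h5]
      · rw [if_neg (by rintro ⟨-, a', b'⟩; exact h5 ⟨a', b'⟩), if_neg h5]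
    have hescf0 : ¬ esc = true → esc = false := by revert hed; cases esc <;> simp
    cases stack with
    | nil =>
      simp only [brun]
      by_cases hesc : esc = true
      · rw [if_pos hesc]
        have hd0 := hed hesc
        subst hd0
        rw [ihN [] start acc trivial]
        simp [AresumeF, hesc]
      · have hescf := hescf0 hesc
        subst hescf
        rw [if_neg hesc]
        by_cases hdc : dollar = true ∧ pvCharAt cs i = '{'
        · rcases hdol hdc.1 with h | h <;> simp at h
        · rw [if_neg hdc]
          have hR : AresumeF cs [] false dollar i start acc = Aresume cs [] i start acc := by
            simp only [AresumeF, Bool.false_eq_true, if_false]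
            rw [if_neg (by rintro ⟨a', -, b'⟩; exact hdc ⟨a', b'⟩)]
          rw [hR, show Aresume cs [] i start acc = findLoop cs i acc from rfl,
            findLoop_step cs i acc hi]
          by_cases h1 : pvCharAt cs i = '"' ∨ pvCharAt cs i = '\''
          · rw [if_pos h1, if_pos h1, ihN [Ctx.str (pvCharAt cs i)] i acc h1]
            rfl
          · rw [if_neg h1, if_neg h1]
            by_cases h2 : pvCharAt cs i = '`'
            · rw [if_pos h2, if_pos h2, ihN [Ctx.tmpl] i acc trivial]
              rfl
            · rw [if_neg h2, if_neg h2, ihN [] start acc trivial]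
              rfl
    | cons c0 t =>
      cases c0 with
      | str q =>
        cases t with
        | cons c1 t1 => exact hv.1.elim
        | nil =>
          have hq : q = '"' ∨ q = '\'' := hv
          simp only [brun]
          by_cases hesc : esc = true
          · rw [if_pos hesc]
            have hd0 := hed hesc
            subst hd0
            rw [ihN [Ctx.str q] start acc hv]
            simp [AresumeF, hesc]
          · have hescf := hescf0 hesc
            subst hescf
            rw [if_neg hesc]
            by_cases hdc : dollar = true ∧ pvCharAt cs i = '{'
            · rcases hdol hdc.1 with h | h <;> simp at h
            · rw [if_neg hdc]
              have hR : AresumeF cs [Ctx.str q] false dollar i start acc =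
                  Aresume cs [Ctx.str q] i start acc := by
                simp only [AresumeF, Bool.false_eq_true, if_false]
                rw [if_neg (by rintro ⟨a', -, b'⟩; exact hdc ⟨a', b'⟩)]
              rw [hR, show Aresume cs [Ctx.str q] i start acc =
                findLoop cs (scanSimpleLoop cs q i)
                  (acc ++ [((start : Int), (scanSimpleLoop cs q i : Int))]) from rfl]
              by_cases hb : pvCharAt cs i = '\\'
              · rw [if_pos hb, ihE [Ctx.str q] start acc hv]
                by_cases h4 : i + 1 < cs.length
                · rw [scanSimple_step cs q i hi, if_pos ⟨hb, h4⟩]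
                  rfl
                · rw [scanSimple_step cs q i hi, if_neg (by rintro ⟨-, h⟩; exact h4 h),
                    if_neg (by intro h; rw [hb] at h; rcases hq with rfl | rfl <;>
                      exact absurd h (by decide)),
                    if_neg (by intro h; rw [hb] at h; exact absurd h (by decide)),
                    scanSimple_eof cs q (i + 1) h4, findLoop_eof cs _ _ (by omega),
                    Aresume_eof cs [Ctx.str q] (i + 2) start acc (by omega) hv]
                  simp
              · rw [if_neg hb]
                by_cases hqe : pvCharAt cs i = q
                · rw [if_pos hqe, ihN [] start _ trivial,
                    show Aresume cs [] (i + 1) start _ = findLoop cs (i + 1) _ from rfl,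
                    scanSimple_step cs q i hi, if_neg (by rintro ⟨h, -⟩; exact hb h), if_pos hqe]
                  norm_cast
                · rw [if_neg hqe]
                  by_cases hnl : pvCharAt cs i = '\n'
                  · rw [if_pos hnl, ihN [] start _ trivial,
                      show Aresume cs [] (i + 1) start _ = findLoop cs (i + 1) _ from rfl,
                      scanSimple_step cs q i hi, if_neg (by rintro ⟨h, -⟩; exact hb h),
                      if_neg hqe, if_pos hnl, findLoop_step cs i _ hi,
                      if_neg (by rw [hnl]; rintro (h | h) <;> exact absurd h (by decide)),
                      if_neg (by rw [hnl]; decide)]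
                  · rw [if_neg hnl, ihN [Ctx.str q] start acc hv,
                      scanSimple_step cs q i hi, if_neg (by rintro ⟨h, -⟩; exact hb h),
                      if_neg hqe, if_neg hnl]
                    rfl
      | tmpl =>
        cases t with
        | cons c1 t1 => exact hv.1.elim
        | nil =>
          simp only [brun]
          by_cases hesc : esc = true
          · rw [if_pos hesc]
            have hd0 := hed hesc
            subst hd0
            rw [ihN [Ctx.tmpl] start acc trivial]
            simp [AresumeF, hesc]
          · have hescf := hescf0 hesc
            subst hescf
            rw [if_neg hesc]
            by_cases hdc : dollar = true ∧ pvCharAt cs i = '{'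
            · rw [if_pos hdc, ihN (Ctx.expr 1 :: [Ctx.tmpl]) start acc ⟨le_refl 1, trivial⟩]
              have hR : AresumeF cs [Ctx.tmpl] false dollar i start acc =
                  Aresume cs (Ctx.expr 1 :: [Ctx.tmpl]) (i + 1) start acc := by
                simp only [AresumeF, Bool.false_eq_true, if_false]
                rw [if_pos ⟨hdc.1, hi, hdc.2⟩]
              rw [hR]
            · rw [if_neg hdc]
              have hR : AresumeF cs [Ctx.tmpl] false dollar i start acc =
                  Aresume cs [Ctx.tmpl] i start acc := by
                simp only [AresumeF, Bool.false_eq_true, if_false]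
                rw [if_neg (by rintro ⟨a', -, b'⟩; exact hdc ⟨a', b'⟩)]
              rw [hR, show Aresume cs [Ctx.tmpl] i start acc =
                findLoop cs (scanTplLoop cs (cs.length + 1) i)
                  (acc ++ [((start : Int), (scanTplLoop cs (cs.length + 1) i : Int))]) from rfl]
              by_cases hb : pvCharAt cs i = '\\'
              · rw [if_pos hb, ihE [Ctx.tmpl] start acc trivial]
                by_cases h4 : i + 1 < cs.length
                · rw [scanTpl_step cs i hi, if_pos ⟨hb, h4⟩]
                  rfl
                · rw [scanTpl_step cs i hi, if_neg (by rintro ⟨-, h⟩; exact h4 h),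
                    if_neg (by intro h; rw [hb] at h; exact absurd h (by decide)),
                    if_neg (by rintro ⟨h, -⟩; rw [hb] at h; exact absurd h (by decide)),
                    scanTpl_eof cs (i + 1) h4, findLoop_eof cs _ _ (by omega),
                    Aresume_eof cs [Ctx.tmpl] (i + 2) start acc (by omega) trivial]
                  simp
              · rw [if_neg hb]
                by_cases hbt : pvCharAt cs i = '`'
                · rw [if_pos hbt, if_pos List.isEmpty_nil, ihN [] start _ trivial,
                    show Aresume cs [] (i + 1) start _ = findLoop cs (i + 1) _ from rfl,
                    scanTpl_step cs i hi, if_neg (by rintro ⟨h, -⟩; exact hb h), if_pos hbt]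
                  norm_cast
                · rw [if_neg hbt]
                  by_cases hd : pvCharAt cs i = '$'
                  · rw [if_pos hd, ihD [Ctx.tmpl] start acc trivial (by intro; simp)]
                    by_cases h5 : i + 1 < cs.length ∧ pvCharAt cs (i + 1) = '{'
                    · rw [if_pos h5, scanTpl_step cs i hi,
                        if_neg (by rintro ⟨h, -⟩; exact hb h), if_neg hbt,
                        if_pos ⟨hd, h5.1, h5.2⟩]
                      rfl
                    · rw [if_neg h5, scanTpl_step cs i hi,
                        if_neg (by rintro ⟨h, -⟩; exact hb h), if_neg hbt,
                        if_neg (by rintro ⟨-, a', b'⟩; exact h5 ⟨a', b'⟩)]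
                      rfl
                  · rw [if_neg hd, ihN [Ctx.tmpl] start acc trivial,
                      scanTpl_step cs i hi, if_neg (by rintro ⟨h, -⟩; exact hb h), if_neg hbt,
                      if_neg (by rintro ⟨h, -⟩; exact hd h)]
                    rfl
      | itmpl =>
        cases t with
        | nil => exact hv.elim
        | cons c1 t1 =>
          simp only [brun]
          by_cases hesc : esc = true
          · rw [if_pos hesc]
            have hd0 := hed hesc
            subst hd0
            rw [ihN (Ctx.itmpl :: c1 :: t1) start acc hv]
            simp [AresumeF, hesc]
          · have hescf := hescf0 hesc
            subst hescf
            rw [if_neg hesc]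
            by_cases hdc : dollar = true ∧ pvCharAt cs i = '{'
            · rw [if_pos hdc, ihN (Ctx.expr 1 :: Ctx.itmpl :: c1 :: t1) start acc ⟨le_refl 1, hv⟩]
              have hR : AresumeF cs (Ctx.itmpl :: c1 :: t1) false dollar i start acc =
                  Aresume cs (Ctx.expr 1 :: Ctx.itmpl :: c1 :: t1) (i + 1) start acc := by
                simp only [AresumeF, Bool.false_eq_true, if_false]
                rw [if_pos ⟨hdc.1, hi, hdc.2⟩]
              rw [hR]
            · rw [if_neg hdc]
              have hR : AresumeF cs (Ctx.itmpl :: c1 :: t1) false dollar i start acc =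
                  Aresume cs (Ctx.itmpl :: c1 :: t1) i start acc := by
                simp only [AresumeF, Bool.false_eq_true, if_false]
                rw [if_neg (by rintro ⟨a', -, b'⟩; exact hdc ⟨a', b'⟩)]
              rw [hR, show Aresume cs (Ctx.itmpl :: c1 :: t1) i start acc =
                Aresume cs (c1 :: t1) (innerTmplLoop cs (cs.length + 1) i + 1) start acc from rfl]
              by_cases hb : pvCharAt cs i = '\\'
              · rw [if_pos hb, ihE (Ctx.itmpl :: c1 :: t1) start acc hv]
                have hne : pvCharAt cs i ≠ '`' := by
                  intro h; rw [hb] at h; exact absurd h (by decide)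
                by_cases h4 : i + 1 < cs.length
                · rw [innerTmpl_step cs i hi hne, if_pos ⟨hb, h4⟩]
                  rfl
                · rw [innerTmpl_step cs i hi hne, if_neg (by rintro ⟨-, h⟩; exact h4 h),
                    if_neg (by rintro ⟨h, -⟩; rw [hb] at h; exact absurd h (by decide)),
                    innerTmpl_close cs (i + 1) (by rintro ⟨h, -⟩; omega),
                    show Aresume cs (Ctx.itmpl :: c1 :: t1) (i + 2) start acc =
                      Aresume cs (c1 :: t1) (innerTmplLoop cs (cs.length + 1) (i + 2) + 1)
                        start acc from rfl,
                    innerTmpl_close cs (i + 2) (by rintro ⟨h, -⟩; omega),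
                    Aresume_eof cs (c1 :: t1) (i + 1 + 1) start acc (by omega) hv.2,
                    Aresume_eof cs (c1 :: t1) (i + 2 + 1) start acc (by omega) hv.2]
              · rw [if_neg hb]
                by_cases hbt : pvCharAt cs i = '`'
                · rw [if_pos hbt, if_neg (by simp : ¬ (c1 :: t1).isEmpty = true),
                    ihN (c1 :: t1) start acc hv.2,
                    innerTmpl_close cs i (by rintro ⟨-, h⟩; exact h hbt)]
                · rw [if_neg hbt]
                  by_cases hd : pvCharAt cs i = '$'
                  · rw [if_pos hd, ihD (Ctx.itmpl :: c1 :: t1) start acc hv (by intro; simp)]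
                    by_cases h5 : i + 1 < cs.length ∧ pvCharAt cs (i + 1) = '{'
                    · rw [if_pos h5, innerTmpl_step cs i hi hbt,
                        if_neg (by rintro ⟨h, -⟩; exact hb h), if_pos ⟨hd, h5.1, h5.2⟩]
                      rfl
                    · rw [if_neg h5, innerTmpl_step cs i hi hbt,
                        if_neg (by rintro ⟨h, -⟩; exact hb h),
                        if_neg (by rintro ⟨-, a', b'⟩; exact h5 ⟨a', b'⟩)]
                      rfl
                  · rw [if_neg hd, ihN (Ctx.itmpl :: c1 :: t1) start acc hv,
                      innerTmpl_step cs i hi hbt, if_neg (by rintro ⟨h, -⟩; exact hb h),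
                      if_neg (by rintro ⟨h, -⟩; exact hd h)]
                    rfl
      | expr d =>
        cases t with
        | nil => exact hv.elim
        | cons c1 t1 =>
          have hd1 : 1 ≤ d := hv.1
          simp only [brun]
          by_cases hesc : esc = true
          · rw [if_pos hesc]
            have hd0 := hed hesc
            subst hd0
            rw [ihN (Ctx.expr d :: c1 :: t1) start acc hv]
            simp [AresumeF, hesc]
          · have hescf := hescf0 hesc
            subst hescf
            rw [if_neg hesc]
            by_cases hdc : dollar = true ∧ pvCharAt cs i = '{'
            · rcases hdol hdc.1 with h | h <;> simp at h
            · rw [if_neg hdc]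
              have hR : AresumeF cs (Ctx.expr d :: c1 :: t1) false dollar i start acc =
                  Aresume cs (Ctx.expr d :: c1 :: t1) i start acc := by
                simp only [AresumeF, Bool.false_eq_true, if_false]
                rw [if_neg (by rintro ⟨a', -, b'⟩; exact hdc ⟨a', b'⟩)]
              rw [hR, show Aresume cs (Ctx.expr d :: c1 :: t1) i start acc =
                Aresume cs (c1 :: t1) (exprLoop cs (cs.length + 1) i d) start acc from rfl,
                expr_step cs i d hi (by omega)]
              by_cases h1 : pvCharAt cs i = '{'
              · rw [if_pos h1, if_pos h1, ihN (Ctx.expr (d + 1) :: c1 :: t1) start acc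
                  ⟨(by omega : (1 : Nat) ≤ d + 1), hv.2⟩]
                rfl
              · rw [if_neg h1, if_neg h1]
                by_cases h2 : pvCharAt cs i = '}'
                · rw [if_pos h2, if_pos h2]
                  by_cases h3 : d = 1
                  · rw [if_pos h3, h3, ihN (c1 :: t1) start acc hv.2,
                      show (1 : Nat) - 1 = 0 from rfl,
                      expr_stop cs (i + 1) 0 (by rintro ⟨-, h⟩; omega)]
                  · rw [if_neg h3, ihN (Ctx.expr (d - 1) :: c1 :: t1) start acc
                      ⟨(by omega : (1 : Nat) ≤ d - 1), hv.2⟩]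
                    rfl
                · rw [if_neg h2, if_neg h2]
                  by_cases h3 : pvCharAt cs i = '"' ∨ pvCharAt cs i = '\''
                  · rw [if_pos h3, if_pos h3, ihN
                      (Ctx.istr (pvCharAt cs i) :: Ctx.expr d :: c1 :: t1) start acc
                      ⟨trivial, hv⟩]
                    rfl
                  · rw [if_neg h3, if_neg h3]
                    by_cases h4 : pvCharAt cs i = '`'
                    · rw [if_pos h4, if_pos h4, ihN
                        (Ctx.itmpl :: Ctx.expr d :: c1 :: t1) start acc ⟨trivial, hv⟩]
                      rfl
                    · rw [if_neg h4, if_neg h4, ihN (Ctx.expr d :: c1 :: t1) start acc hv]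
                      rfl
      | istr q =>
        cases t with
        | nil => exact hv.elim
        | cons c1 t1 =>
          simp only [brun]
          by_cases hesc : esc = true
          · rw [if_pos hesc]
            have hd0 := hed hesc
            subst hd0
            rw [ihN (Ctx.istr q :: c1 :: t1) start acc hv]
            simp [AresumeF, hesc]
          · have hescf := hescf0 hesc
            subst hescf
            rw [if_neg hesc]
            by_cases hdc : dollar = true ∧ pvCharAt cs i = '{'
            · rcases hdol hdc.1 with h | h <;> simp at h
            · rw [if_neg hdc]
              have hR : AresumeF cs (Ctx.istr q :: c1 :: t1) false dollar i start acc =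
                  Aresume cs (Ctx.istr q :: c1 :: t1) i start acc := by
                simp only [AresumeF, Bool.false_eq_true, if_false]
                rw [if_neg (by rintro ⟨a', -, b'⟩; exact hdc ⟨a', b'⟩)]
              rw [hR, show Aresume cs (Ctx.istr q :: c1 :: t1) i start acc =
                Aresume cs (c1 :: t1) (innerStrLoop cs q i + 1) start acc from rfl]
              by_cases hqe : pvCharAt cs i = q
              · rw [if_pos hqe, ihN (c1 :: t1) start acc hv.2,
                  innerStr_stop cs q i (by rintro ⟨-, h⟩; exact h hqe)]
              · rw [if_neg hqe]
                by_cases hb : pvCharAt cs i = '\\'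
                · rw [if_pos hb, ihE (Ctx.istr q :: c1 :: t1) start acc hv]
                  by_cases h4 : i + 1 < cs.length
                  · rw [innerStr_step cs q i hi hqe, if_pos ⟨hb, h4⟩]
                    rfl
                  · rw [innerStr_step cs q i hi hqe, if_neg (by rintro ⟨-, h⟩; exact h4 h),
                      innerStr_stop cs q (i + 1) (by rintro ⟨h, -⟩; omega),
                      show Aresume cs (Ctx.istr q :: c1 :: t1) (i + 2) start acc =
                        Aresume cs (c1 :: t1) (innerStrLoop cs q (i + 2) + 1) start acc from rfl,
                      innerStr_stop cs q (i + 2) (by rintro ⟨h, -⟩; omega),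
                      Aresume_eof cs (c1 :: t1) (i + 1 + 1) start acc (by omega) hv.2,
                      Aresume_eof cs (c1 :: t1) (i + 2 + 1) start acc (by omega) hv.2]
                · rw [if_neg hb, ihN (Ctx.istr q :: c1 :: t1) start acc hv,
                    innerStr_step cs q i hi hqe, if_neg (by rintro ⟨h, -⟩; exact hb h)]
                  rfl

-- ===== VERDICT (by name: the statement is the Claim_ definition above) =====
theorem find_string_literals_py_spec : Claim_equal_find_string_literals_py := by
  intro text _hdom
  unfold Spec_find_string_literals_py find_string_literals_py find_string_literals_py_alt
  have h := brun_eq_AresumeF text.toList text.toList 0 0 [] false false []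
    (by simp) trivial (by simp [DollarOk]) (by simp)
  simp only [AresumeF, Bool.false_eq_true, if_false, false_and] at h
  exact h.symm
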